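-- pv_equiv track=rewrite | github.com/coolpint/scourt | src/scourt_bot/config.py | _as_hours
-- ===== SOURCE A (Python) =====
-- def _as_hours(value: str) -> tuple[int, ...]:
--     raw = [v.strip() for v in value.split(",") if v.strip()]
--     hours = []
--     for token in raw:
--         try:
--             hour = int(token)
--         except ValueError:
--             continue
--         if 0 <= hour <= 23:
--             hours.append(hour)
--     return tuple(sorted(set(hours))) or (10, 18)
-- ===== SOURCE B (Python) =====
-- def _as_hours(value: str) -> tuple[int, ...]:
--     # Bucket marking over the fixed domain 0..23: one pass marks, one range(24)
--     # scan emits hours already sorted and deduplicated -- no sorted(), no set().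
--     present = [False] * 24
--     for piece in value.split(","):
--         token = piece.strip()
--         if not token:
--             continue
--         try:
--             hour = int(token)
--         except ValueError:
--             continue
--         if 0 <= hour <= 23:
--             present[hour] = True
--     hours = tuple(h for h in range(24) if present[h])
--     return hours if hours else (10, 18)
-- ===== Notes on version B (the rewrite author's own statement) =====
-- stated objective: alternative
-- what changed: B replaces the collected list + set() + sorted() pipeline by a fixed 24-slot boolean bucket array marked during one pass over the tokens, then emits the hours by scanning range(24), which yields them sorted and deduplicated by construction.
import Mathlib
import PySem

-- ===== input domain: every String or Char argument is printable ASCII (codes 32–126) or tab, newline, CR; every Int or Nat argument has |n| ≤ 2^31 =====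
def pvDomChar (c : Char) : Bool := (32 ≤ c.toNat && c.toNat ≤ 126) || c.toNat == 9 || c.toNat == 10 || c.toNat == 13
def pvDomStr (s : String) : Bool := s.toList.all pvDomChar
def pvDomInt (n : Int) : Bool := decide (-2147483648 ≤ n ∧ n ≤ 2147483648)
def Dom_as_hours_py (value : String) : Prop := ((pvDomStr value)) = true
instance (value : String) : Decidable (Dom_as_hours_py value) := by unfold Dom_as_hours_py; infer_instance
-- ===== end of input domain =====

set_option maxHeartbeats 1000000


-- B marks valid hours in a fixed 24-slot boolean bucket array and emits them by a
-- range(24) scan (sorted/deduplicated by construction) instead of list + set() + sorted().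

-- ===== PORT A =====
def as_hours_py (value : String) : List Int :=
  let raw := (((PySem.Str.split? value ",").getD []).filter
      (fun v => PySem.Str.strip v != "")).map (fun v => PySem.Str.strip v)
  let hours := raw.foldl (fun hours token =>
      match PySem.Int.ofStr? token with
      | none => hours
      | some hour => if 0 ≤ hour ∧ hour ≤ 23 then hours ++ [hour] else hours)
    ([] : List Int)
  let result := PySem.List.sorted (PySem.Set.ofList hours) (fun x => x) false
  if result = [] then [10, 18] else result

-- ===== PORT B =====
def as_hours_py_alt (value : String) : List Int :=
  let present := ((PySem.Str.split? value ",").getD []).foldl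
    (fun present piece =>
      let token := PySem.Str.strip piece
      if token == "" then present
      else
        match PySem.Int.ofStr? token with
        | none => present
        | some hour =>
          if 0 ≤ hour ∧ hour ≤ 23 then PySem.List.pySetD present hour true else present)
    (List.replicate 24 false)
  let hours := (PySem.List.pyRange 0 24 1).filter (fun h => PySem.List.pyGetD present h false)
  if hours = [] then [10, 18] else hours

-- ===== PRECONDITION & SPEC =====
def Spec_as_hours_py (value : String) (out : List Int) : Prop := out = as_hours_py_alt value
instance (value : String) (out : List Int) : Decidable (Spec_as_hours_py value out) := by unfold Spec_as_hours_py; infer_instance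

-- ===== CLAIM (what is proved, stated in full; the proofs are below) =====
def Claim_equal_as_hours_py : Prop := ∀ (value : String), Dom_as_hours_py value → Spec_as_hours_py value (as_hours_py value)

-- ===== LEMMAS AND PROOFS =====

-- A's loop body on an already-stripped nonempty token
def pvStepA (hours : List Int) (token : String) : List Int :=
  match PySem.Int.ofStr? token with
  | none => hours
  | some hour => if 0 ≤ hour ∧ hour ≤ 23 then hours ++ [hour] else hours

-- A's loop body seen on a raw comma piece (strip first, skip empties)
def pvGStepA (acc : List Int) (v : String) : List Int :=
  if PySem.Str.strip v == "" then acc else pvStepA acc (PySem.Str.strip v)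

-- B's loop body on a raw comma piece
def pvStepB (present : List Bool) (piece : String) : List Bool :=
  let token := PySem.Str.strip piece
  if token == "" then present
  else
    match PySem.Int.ofStr? token with
    | none => present
    | some hour =>
      if 0 ≤ hour ∧ hour ≤ 23 then PySem.List.pySetD present hour true else present

theorem pvGStepA_empty (acc : List Int) (v : String) (h : PySem.Str.strip v = "") :
    pvGStepA acc v = acc := by simp [pvGStepA, h]

theorem pvGStepA_none (acc : List Int) (v : String) (h : PySem.Str.strip v ≠ "")
    (hp : PySem.Int.ofStr? (PySem.Str.strip v) = none) :
    pvGStepA acc v = acc := by simp [pvGStepA, pvStepA, h, hp]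

theorem pvGStepA_some (acc : List Int) (v : String) (hour : Int) (h : PySem.Str.strip v ≠ "")
    (hp : PySem.Int.ofStr? (PySem.Str.strip v) = some hour) :
    pvGStepA acc v = if 0 ≤ hour ∧ hour ≤ 23 then acc ++ [hour] else acc := by
  simp [pvGStepA, pvStepA, h, hp]

theorem pvStepB_empty (present : List Bool) (v : String) (h : PySem.Str.strip v = "") :
    pvStepB present v = present := by simp [pvStepB, h]

theorem pvStepB_none (present : List Bool) (v : String) (h : PySem.Str.strip v ≠ "")
    (hp : PySem.Int.ofStr? (PySem.Str.strip v) = none) :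
    pvStepB present v = present := by simp [pvStepB, h, hp]

theorem pvStepB_some (present : List Bool) (v : String) (hour : Int) (h : PySem.Str.strip v ≠ "")
    (hp : PySem.Int.ofStr? (PySem.Str.strip v) = some hour) :
    pvStepB present v =
      if 0 ≤ hour ∧ hour ≤ 23 then PySem.List.pySetD present hour true else present := by
  simp [pvStepB, h, hp]

-- A's fold over the filtered+stripped list equals a guarded fold over the raw pieces
theorem pv_foldA_guard (toks : List String) (acc : List Int) :
    ((toks.filter (fun v => PySem.Str.strip v != "")).map (fun v => PySem.Str.strip v)).foldl
      pvStepA acc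
    = toks.foldl pvGStepA acc := by
  induction toks generalizing acc with
  | nil => rfl
  | cons v vs ih =>
    by_cases h : PySem.Str.strip v = ""
    · simp [h, ih, pvGStepA_empty]
    · have hb2 : (PySem.Str.strip v == "") = false := by simp [h]
      have hstep : pvStepA acc (PySem.Str.strip v) = pvGStepA acc v := by
        rw [pvGStepA, hb2]; simp
      simp only [List.filter_cons, List.foldl_cons]
      have hb : (PySem.Str.strip v != "") = true := by simp [h]
      rw [hb]
      simp only [if_true, List.map_cons, List.foldl_cons]
      rw [hstep, ih]

theorem pv_invariant (toks : List String) (hours : List Int) (present : List Bool)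
    (hlen : present.length = 24)
    (hmem : ∀ h : Int, 0 ≤ h → h < 24 →
      (PySem.List.pyGetD present h false = true ↔ h ∈ hours))
    (hrange : ∀ h ∈ hours, 0 ≤ h ∧ h < 24) :
    (toks.foldl pvStepB present).length = 24 ∧
    (∀ h : Int, 0 ≤ h → h < 24 →
      (PySem.List.pyGetD (toks.foldl pvStepB present) h false = true ↔
        h ∈ toks.foldl pvGStepA hours)) ∧
    (∀ h ∈ toks.foldl pvGStepA hours, 0 ≤ h ∧ h < 24) := by
  induction toks generalizing hours present with
  | nil => exact ⟨hlen, hmem, hrange⟩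
  | cons v vs ih =>
    simp only [List.foldl_cons]
    by_cases hv : PySem.Str.strip v = ""
    · rw [pvStepB_empty _ _ hv, pvGStepA_empty _ _ hv]
      exact ih hours present hlen hmem hrange
    · cases hp : PySem.Int.ofStr? (PySem.Str.strip v) with
      | none =>
        rw [pvStepB_none _ _ hv hp, pvGStepA_none _ _ hv hp]
        exact ih hours present hlen hmem hrange
      | some hour =>
        rw [pvStepB_some _ _ _ hv hp, pvGStepA_some _ _ _ hv hp]
        by_cases hr : 0 ≤ hour ∧ hour ≤ 23
        · rw [if_pos hr, if_pos hr]
          apply ih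
          · rw [PySem.List.length_pySetD, hlen]
          · intro h h0 h24
            rw [PySem.List.pySetD_of_nonneg present true hr.1]
            have hlen' : (present.set hour.toNat true).length = 24 := by simp [hlen]
            rw [PySem.List.pyGetD_eq_getElem _ _ h0 (by rw [hlen']; omega)]
            by_cases heq : h = hour
            · subst heq
              simp [List.getElem_set_self]
            · have hne : hour.toNat ≠ h.toNat := by omega
              rw [List.getElem_set_ne hne]
              rw [← PySem.List.pyGetD_eq_getElem present false h0 (by rw [hlen]; omega)]
              simp [hmem h h0 h24, heq]
          · intro h hh
            rcases List.mem_append.mp hh with hh | hh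
            · exact hrange h hh
            · simp at hh; omega
        · rw [if_neg hr, if_neg hr]
          exact ih hours present hlen hmem hrange

theorem pv_final (hours : List Int) (present : List Bool)
    (hmem : ∀ h : Int, 0 ≤ h → h < 24 →
      (PySem.List.pyGetD present h false = true ↔ h ∈ hours))
    (hrange : ∀ h ∈ hours, 0 ≤ h ∧ h < 24) :
    PySem.List.sorted (PySem.Set.ofList hours) (fun x => x) false
    = (PySem.List.pyRange 0 24 1).filter (fun h => PySem.List.pyGetD present h false) := by
  apply PySem.List.sorted_eq_of_perm_of_pairwise_lt
  · -- permutation: both nodup with the same membership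
    rw [List.perm_ext_iff_of_nodup
      ((PySem.List.nodup_pyRange_one 0 24).filter _) (PySem.Set.nodup_ofList hours)]
    intro h
    rw [List.mem_filter, PySem.Set.mem_ofList, PySem.List.mem_pyRange_one]
    constructor
    · rintro ⟨⟨h0, h24⟩, hpres⟩
      exact (hmem h h0 h24).mp hpres
    · intro hh
      have := hrange h hh
      exact ⟨this, (hmem h this.1 this.2).mpr hh⟩
  · exact (PySem.List.pairwise_lt_pyRange_one 0 24).sublist List.filter_sublist

-- ===== VERDICT (by name: the statement is the Claim_ definition above) =====
theorem as_hours_py_spec : Claim_equal_as_hours_py := by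
  intro value _
  unfold Spec_as_hours_py as_hours_py as_hours_py_alt
  have hbase : ∀ h : Int, 0 ≤ h → h < 24 →
      (PySem.List.pyGetD (List.replicate 24 false) h false = true ↔ h ∈ ([] : List Int)) := by
    intro h h0 h24
    rw [PySem.List.pyGetD_eq_getElem _ _ h0 (by simp; omega)]
    simp only [List.getElem_replicate]
    simp
  obtain ⟨-, hmem, hrange⟩ :=
    pv_invariant ((PySem.Str.split? value ",").getD []) [] (List.replicate 24 false)
      (by simp) hbase (by simp)
  have hA := pv_foldA_guard ((PySem.Str.split? value ",").getD []) []
  have heq := pv_final _ _ hmem hrange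
  simp only [show (fun (hours : List Int) (token : String) =>
      match PySem.Int.ofStr? token with
      | none => hours
      | some hour => if 0 ≤ hour ∧ hour ≤ 23 then hours ++ [hour] else hours) = pvStepA from rfl]
  simp only [show (fun (present : List Bool) (piece : String) =>
      let token := PySem.Str.strip piece
      if token == "" then present
      else
        match PySem.Int.ofStr? token with
        | none => present
        | some hour =>
          if 0 ≤ hour ∧ hour ≤ 23 then PySem.List.pySetD present hour true else present)
      = pvStepB from rfl]
  rw [hA, heq]
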